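-- pv_equiv track=rewrite | github.com/aniaodoj66/WDI | zbiór zadań/zestaw 2/zad89.py | podciag
-- ===== SOURCE A (Python) =====
-- def zamiana4(x):
--     liczba = 0
--     k = 0
--     while x > 0:
--         liczba += (x % 4) * (10 ** k)
--         x = x // 4
--         k += 1
--     return liczba
--
-- def te_same(x, y):
--     x = zamiana4(x)
--     y = zamiana4(y)
--     lista_x = [0 for _ in range(10)]
--     lista_y = [0 for _ in range(10)]
--     while x > 0:
--         lista_x[x % 10] = 1
--         x = x // 10
--     while y > 0:
--         lista_y[y % 10] = 1
--         y = y // 10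
--     if lista_x == lista_y:
--         return True
--     return False
--
-- def podciag(T):
--     dlugosci = [1 for _ in range(len(T))]
--     for i in range(1, len(T)):
--         for j in range(i):
--             if te_same(T[i], T[j]):
--                 if dlugosci[j] + 1 > dlugosci[i]:
--                     dlugosci[i] = dlugosci[j] + 1
--     maksimum = 0
--     for i in range(len(dlugosci)):
--         if dlugosci[i] > maksimum:
--             maksimum = dlugosci[i]
--     return maksimum, dlugosci
-- ===== SOURCE B (Python) =====
-- def podciag(T):
--     # One pass: key each element by the set of its base-4 digits (as a 4-bool
--     # presence tuple) and keep a running per-class counter.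
--     counts = {}
--     dlugosci = []
--     for x in T:
--         seen = [False, False, False, False]
--         while x > 0:
--             seen[x % 4] = True
--             x //= 4
--         k = tuple(seen)
--         c = counts.get(k, 0) + 1
--         counts[k] = c
--         dlugosci.append(c)
--     return max(dlugosci, default=0), dlugosci
-- ===== Notes on version B (the rewrite author's own statement) =====
-- stated objective: faster
-- what changed: B replaces A's O(n^2) all-pairs DP (with per-pair base-4/decimal digit-set comparison) by a single pass that keys each element by the presence-vector of its base-4 digits and keeps a running per-class counter in a dict; dlugosci[i] is just the running count of element i's class, and the maximum is taken with max(..., default=0).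
import Mathlib
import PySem

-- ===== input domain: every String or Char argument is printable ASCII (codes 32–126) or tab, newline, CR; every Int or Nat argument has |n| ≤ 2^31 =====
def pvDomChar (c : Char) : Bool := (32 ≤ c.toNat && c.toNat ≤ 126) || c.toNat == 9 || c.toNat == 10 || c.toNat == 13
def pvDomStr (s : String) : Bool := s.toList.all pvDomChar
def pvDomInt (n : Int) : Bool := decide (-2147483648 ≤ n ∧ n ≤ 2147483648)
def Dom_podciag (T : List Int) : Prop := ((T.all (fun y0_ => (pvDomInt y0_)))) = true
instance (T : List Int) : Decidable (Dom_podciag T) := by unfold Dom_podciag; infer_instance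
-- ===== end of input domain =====

-- B replaces A's O(n^2·d) pairwise-DP by one pass with a per-digit-set counter (O(n·d)); return value only.

-- termination helper for the while-loops 'x = x // b' (cited by decreasing_by)
theorem pvFdivLt (x b : Int) (hx : 0 < x) (hb : 1 < b) :
    (PySem.Int.floordiv x b).toNat < x.toNat := by
  rw [PySem.Int.floordiv_eq_ediv_of_pos (by omega)]
  have h1 : x / b < x := by rw [Int.ediv_lt_iff_lt_mul (by omega)]; nlinarith
  have h2 : 0 ≤ x / b := Int.ediv_nonneg (by omega) (by omega)
  omega

-- ===== PORT A =====
def zamiana4Loop (x liczba : Int) (k : Nat) : Int :=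
  if h : 0 < x then
    zamiana4Loop (PySem.Int.floordiv x 4) (liczba + PySem.Int.mod x 4 * 10 ^ k) (k + 1)
  else liczba
termination_by x.toNat
decreasing_by exact pvFdivLt x 4 h (by omega)

def zamiana4 (x : Int) : Int := zamiana4Loop x 0 0

def digitsLoop (lista : List Int) (v : Int) : List Int :=
  if h : 0 < v then
    digitsLoop (PySem.List.pySetD lista (PySem.Int.mod v 10) 1) (PySem.Int.floordiv v 10)
  else lista
termination_by v.toNat
decreasing_by exact pvFdivLt v 10 h (by omega)

def te_same (x y : Int) : Bool :=
  let x' := zamiana4 x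
  let y' := zamiana4 y
  let lista_x := digitsLoop (List.replicate 10 0) x'
  let lista_y := digitsLoop (List.replicate 10 0) y'
  if lista_x = lista_y then true else false

def podciag (T : List Int) : Int × List Int :=
  let dlugosci := (PySem.List.pyRange 0 (T.length : Int) 1).map (fun _ => (1 : Int))
  let dl := (PySem.List.pyRange 1 (T.length : Int) 1).foldl (fun dl i =>
      (PySem.List.pyRange 0 i 1).foldl (fun dl j =>
        if te_same (PySem.List.pyGetD T i 0) (PySem.List.pyGetD T j 0) then
          if PySem.List.pyGetD dl j 0 + 1 > PySem.List.pyGetD dl i 0 then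
            PySem.List.pySetD dl i (PySem.List.pyGetD dl j 0 + 1)
          else dl
        else dl) dl) dlugosci
  let maksimum := (PySem.List.pyRange 0 (dl.length : Int) 1).foldl (fun m i =>
      if PySem.List.pyGetD dl i 0 > m then PySem.List.pyGetD dl i 0 else m) 0
  (maksimum, dl)

-- ===== PORT B =====
def key4Loop (seen : List Bool) (x : Int) : List Bool :=
  if h : 0 < x then
    key4Loop (PySem.List.pySetD seen (PySem.Int.mod x 4) true) (PySem.Int.floordiv x 4)
  else seen
termination_by x.toNat
decreasing_by exact pvFdivLt x 4 h (by omega)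

def podciag_alt (T : List Int) : Int × List Int :=
  let st := T.foldl (fun (st : PySem.Dict (List Bool) Int × List Int) x =>
      let k := key4Loop [false, false, false, false] x
      let c := st.1.getD k 0 + 1
      (st.1.insert k c, st.2 ++ [c])) (PySem.Dict.empty, [])
  ((PySem.List.max? st.2 (fun v => v)).getD 0, st.2)

-- ===== PRECONDITION & SPEC =====
def Spec_podciag (T : List Int) (out : Int × List Int) : Prop := out = podciag_alt T
instance (T : List Int) (out : Int × List Int) : Decidable (Spec_podciag T out) := by unfold Spec_podciag; infer_instance

-- ===== CLAIM (what is proved, stated in full; the proofs are below) =====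
def Claim_equal_podciag : Prop := ∀ (T : List Int), Dom_podciag T → Spec_podciag T (podciag T)

-- ===== LEMMAS AND PROOFS =====

-- the class key of an element: presence vector of its base-4 digits
def keyOf (x : Int) : List Bool := key4Loop [false, false, false, false] x

-- encode a 4-flag vector as A's 10-slot 0/1 list
def enc (bs : List Bool) : List Int := bs.map (fun b => if b then 1 else 0) ++ [0, 0, 0, 0, 0, 0]

-- the pure value of zamiana4: decimal digits = base-4 digits
def g (x : Int) : Int :=
  if h : 0 < x then PySem.Int.mod x 4 + 10 * g (PySem.Int.floordiv x 4) else 0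
termination_by x.toNat
decreasing_by exact pvFdivLt x 4 h (by omega)

-- occurrences of key k among the keys of P
def cnt (k : List Bool) (P : List Int) : Int := (P.countP (fun y => keyOf y == k) : Int)

-- the common result list: element i gets (occurrences of its key up to and including i)
def specDl (pre L : List Int) : List Int :=
  match L with
  | [] => []
  | x :: rest => (cnt (keyOf x) pre + 1) :: specDl (pre ++ [x]) rest

theorem zamiana4Loop_eq (x liczba : Int) (k : Nat) :
    zamiana4Loop x liczba k = liczba + 10 ^ k * g x := by
  rw [zamiana4Loop.eq_def, g.eq_def]
  by_cases h : 0 < x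
  · rw [dif_pos h, dif_pos h, zamiana4Loop_eq (PySem.Int.floordiv x 4) _ (k + 1)]
    ring
  · rw [dif_neg h, dif_neg h]; ring
termination_by x.toNat
decreasing_by exact pvFdivLt x 4 h (by omega)

theorem g_nonneg (x : Int) : 0 ≤ g x := by
  rw [g.eq_def]
  by_cases h : 0 < x
  · rw [dif_pos h]
    have h1 := PySem.Int.mod_nonneg x (b := 4) (by omega)
    have h2 := g_nonneg (PySem.Int.floordiv x 4)
    omega
  · rw [dif_neg h]
termination_by x.toNat
decreasing_by exact pvFdivLt x 4 h (by omega)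

theorem g_pos (x : Int) (hx : 0 < x) : 0 < g x := by
  rw [g.eq_def, dif_pos hx]
  have h1 := PySem.Int.mod_nonneg x (b := 4) (by omega)
  by_cases h : 0 < PySem.Int.mod x 4
  · have := g_nonneg (PySem.Int.floordiv x 4)
    omega
  · have hq : 0 < PySem.Int.floordiv x 4 := by
      rw [PySem.Int.floordiv_eq_ediv_of_pos (by omega)]
      rw [PySem.Int.mod_eq_emod_of_pos (by omega)] at h
      omega
    have := g_pos (PySem.Int.floordiv x 4) hq
    omega
termination_by x.toNat
decreasing_by exact pvFdivLt x 4 (by omega) (by omega)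

theorem encSet (bs : List Bool) (hl : bs.length = 4) (d : Int) (h0 : 0 ≤ d) (h4 : d < 4) :
    PySem.List.pySetD (enc bs) d 1 = enc (PySem.List.pySetD bs d true) := by
  rw [PySem.List.pySetD_of_nonneg _ _ h0, PySem.List.pySetD_of_nonneg _ _ h0]
  unfold enc
  rw [List.set_append_left _ _ (by simp [hl]; omega)]
  simp [List.map_set]

theorem digitsLoop_enc (x : Int) (bs : List Bool) (hl : bs.length = 4) :
    digitsLoop (enc bs) (g x) = enc (key4Loop bs x) := by
  rw [key4Loop.eq_def]
  by_cases h : 0 < x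
  · rw [dif_pos h]
    have hg : 0 < g x := g_pos x h
    have hm0 := PySem.Int.mod_nonneg x (b := 4) (by omega)
    have hm4 := PySem.Int.mod_lt x (b := 4) (by omega)
    have hG := g_nonneg (PySem.Int.floordiv x 4)
    have hgx : g x = PySem.Int.mod x 4 + 10 * g (PySem.Int.floordiv x 4) := by
      rw [g.eq_def, dif_pos h]
    rw [digitsLoop.eq_def, dif_pos hg]
    have hmod : PySem.Int.mod (g x) 10 = PySem.Int.mod x 4 := by
      rw [PySem.Int.mod_eq_emod_of_pos (by omega), hgx]; omega
    have hdiv : PySem.Int.floordiv (g x) 10 = g (PySem.Int.floordiv x 4) := by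
      rw [PySem.Int.floordiv_eq_ediv_of_pos (by omega), hgx]; omega
    rw [hmod, hdiv, encSet bs hl _ hm0 hm4,
      digitsLoop_enc (PySem.Int.floordiv x 4) _
        (by rw [PySem.List.length_pySetD]; exact hl)]
  · rw [dif_neg h]
    have hg : ¬ 0 < g x := by rw [g.eq_def, dif_neg h]; omega
    rw [digitsLoop.eq_def, dif_neg hg]
termination_by x.toNat
decreasing_by exact pvFdivLt x 4 h (by omega)

theorem length_key4Loop (bs : List Bool) (x : Int) :
    (key4Loop bs x).length = bs.length := by
  rw [key4Loop.eq_def]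
  by_cases h : 0 < x
  · rw [dif_pos h, length_key4Loop, PySem.List.length_pySetD]
  · rw [dif_neg h]
termination_by x.toNat
decreasing_by exact pvFdivLt x 4 h (by omega)

theorem enc_inj (bs bs' : List Bool) (h4 : bs.length = 4) (h4' : bs'.length = 4)
    (h : enc bs = enc bs') : bs = bs' := by
  unfold enc at h
  have h2 : bs.map (fun b => if b then (1:Int) else 0) = bs'.map (fun b => if b then (1:Int) else 0) :=
    List.append_inj_left h (by simp [h4, h4'])
  have hinj : Function.Injective (fun b : Bool => if b then (1:Int) else 0) := by
    intro a b hab; cases a <;> cases b <;> simp_all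
  exact List.map_injective_iff.mpr hinj h2

theorem zamiana4_eq_g (x : Int) : zamiana4 x = g x := by
  unfold zamiana4; rw [zamiana4Loop_eq]; ring

theorem lista_eq (x : Int) :
    digitsLoop (List.replicate 10 0) (zamiana4 x) = enc (keyOf x) := by
  rw [zamiana4_eq_g]
  have : (List.replicate 10 (0:Int)) = enc [false, false, false, false] := by decide
  rw [this, digitsLoop_enc x _ (by decide)]
  rfl

theorem te_same_eq (x y : Int) : te_same x y = (keyOf x == keyOf y) := by
  simp only [te_same]
  rw [lista_eq, lista_eq]
  by_cases h : keyOf x = keyOf y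
  · simp [h]
  · have : enc (keyOf x) ≠ enc (keyOf y) := fun he =>
      h (enc_inj _ _ (by rw [keyOf, length_key4Loop]; rfl) (by rw [keyOf, length_key4Loop]; rfl) he)
    simp [h, this]

theorem length_specDl (pre L : List Int) : (specDl pre L).length = L.length := by
  induction L generalizing pre with
  | nil => rfl
  | cons x rest ih => simp [specDl, ih]

theorem getElem_specDl (L pre : List Int) (i : Nat) (h : i < L.length) :
    (specDl pre L)[i]'(by rw [length_specDl]; exact h) =
      cnt (keyOf L[i]) (pre ++ L.take i) + 1 := by
  induction L generalizing pre i with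
  | nil => simp at h
  | cons x rest ih =>
    cases i with
    | zero => simp [specDl]
    | succ i =>
      simp only [specDl, List.getElem_cons_succ, List.take_succ_cons]
      rw [ih _ _ (by simpa using h)]
      simp [List.append_assoc]

theorem one_le_mem_specDl (pre L : List Int) (v : Int) (hv : v ∈ specDl pre L) : 1 ≤ v := by
  induction L generalizing pre with
  | nil => simp [specDl] at hv
  | cons x rest ih =>
    simp only [specDl, List.mem_cons] at hv
    rcases hv with h | h
    · have : (0:Int) ≤ cnt (keyOf x) pre := Int.natCast_nonneg _
      omega
    · exact ih _ h

theorem cnt_append_singleton (k : List Bool) (pre : List Int) (x : Int) :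
    cnt k (pre ++ [x]) = cnt k pre + (if keyOf x = k then 1 else 0) := by
  unfold cnt
  rw [List.countP_append]
  push_cast
  split_ifs with h <;> simp [h]

theorem altFold (L pre acc : List Int) (d : PySem.Dict (List Bool) Int)
    (hd : ∀ k, d.getD k 0 = cnt k pre) :
    (L.foldl (fun (st : PySem.Dict (List Bool) Int × List Int) x =>
      let k := key4Loop [false, false, false, false] x
      let c := st.1.getD k 0 + 1
      (st.1.insert k c, st.2 ++ [c])) (d, acc)).2 = acc ++ specDl pre L := by
  induction L generalizing pre acc d with
  | nil => simp [specDl]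
  | cons x rest ih =>
    simp only [List.foldl_cons, specDl]
    have hk : key4Loop [false, false, false, false] x = keyOf x := rfl
    rw [hk, hd (keyOf x),
      ih (pre ++ [x]) _ _ (fun k' => by
        rw [PySem.Dict.getD_insert, cnt_append_singleton]
        by_cases h : k' = keyOf x
        · rw [if_pos h, if_pos h.symm, h]
        · rw [if_neg h, if_neg (fun hh => h hh.symm), hd k', add_zero])]
    simp [List.append_assoc]

theorem alt_eq (T : List Int) :
    podciag_alt T = ((PySem.List.max? (specDl [] T) (fun v => v)).getD 0, specDl [] T) := by
  simp only [podciag_alt]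
  rw [altFold T [] [] PySem.Dict.empty (fun k => by
    rw [PySem.Dict.getD_empty]; rfl)]
  simp

-- proof-side: the list state of A's outer loop before iteration i
def Dfun (T : List Int) (i : Nat) : List Int :=
  (specDl [] T).take i ++ List.replicate (T.length - i) 1

theorem length_Dfun (T : List Int) (i : Nat) (hi : i ≤ T.length) :
    (Dfun T i).length = T.length := by
  simp [Dfun, length_specDl]; omega

theorem getElem_Dfun (T : List Int) (i j : Nat) (hi : i ≤ T.length) (hj : j < T.length) :
    (Dfun T i)[j]'(by rw [length_Dfun T i hi]; exact hj) =
      if j < i then cnt (keyOf (T.getD j 0)) (T.take j) + 1 else 1 := by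
  have hlen : ((specDl [] T).take i).length = i := by
    simp [length_specDl]; omega
  unfold Dfun
  rw [List.getElem_append]
  by_cases h : j < i
  · rw [dif_pos (by rw [hlen]; exact h), if_pos h, List.getElem_take,
      getElem_specDl T [] j hj, List.nil_append, List.getD_eq_getElem _ _ hj]
  · rw [dif_neg (by rw [hlen]; exact h), if_neg h, List.getElem_replicate]

theorem getD_Dfun (T : List Int) (i j : Nat) (hi : i ≤ T.length) (hj : j < T.length) :
    (Dfun T i).getD j 0 = if j < i then cnt (keyOf (T.getD j 0)) (T.take j) + 1 else 1 := by
  rw [List.getD_eq_getElem _ _ (by rw [length_Dfun T i hi]; exact hj),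
    getElem_Dfun T i j hi hj]

theorem cnt_nil (k : List Bool) : cnt k [] = 0 := rfl

theorem cnt_take_succ (T : List Int) (k : List Bool) (j : Nat) (hj : j < T.length) :
    cnt k (T.take (j + 1)) = cnt k (T.take j) + (if keyOf (T.getD j 0) = k then 1 else 0) := by
  rw [List.take_add_one, List.getElem?_eq_getElem hj]
  simp only [Option.toList_some]
  rw [cnt_append_singleton, List.getD_eq_getElem _ _ hj]

theorem Dfun_set (T : List Int) (i : Nat) (hin : i < T.length) :
    PySem.List.pySetD (Dfun T i) (i : Int) (cnt (keyOf (T.getD i 0)) (T.take i) + 1) =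
      Dfun T (i + 1) := by
  rw [PySem.List.pySetD_natCast]
  apply List.ext_getElem
  · rw [List.length_set, length_Dfun _ _ (le_of_lt hin), length_Dfun _ _ hin]
  · intro k hk1 hk2
    have hkT : k < T.length := by rwa [List.length_set, length_Dfun _ _ (le_of_lt hin)] at hk1
    rw [List.getElem_set, getElem_Dfun T (i + 1) k hin hkT]
    by_cases hki : i = k
    · subst hki
      rw [if_pos rfl, if_pos (by omega)]
    · rw [if_neg hki, getElem_Dfun T i k (le_of_lt hin) hkT]
      by_cases h : k < i
      · rw [if_pos h, if_pos (by omega)]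
      · rw [if_neg h, if_neg (by omega)]

theorem Dfun_zero_one (T : List Int) (hn : 1 ≤ T.length) : Dfun T 0 = Dfun T 1 := by
  have h := Dfun_set T 0 (by omega)
  rw [List.take_zero, cnt_nil, zero_add, PySem.List.pySetD_natCast] at h
  have hl : 0 < (Dfun T 0).length := by rw [length_Dfun T 0 (by omega)]; omega
  have h0 : (Dfun T 0)[0]'hl = 1 := by
    rw [getElem_Dfun T 0 0 (by omega) (by omega)]; simp
  calc Dfun T 0 = (Dfun T 0).set 0 ((Dfun T 0)[0]'hl) := (List.set_getElem_self hl).symm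
    _ = (Dfun T 0).set 0 1 := by rw [h0]
    _ = Dfun T (0 + 1) := h
    _ = Dfun T 1 := by norm_num

theorem dl0_eq (T : List Int) :
    (PySem.List.pyRange 0 (T.length : Int) 1).map (fun _ => (1 : Int)) = Dfun T 0 := by
  rw [List.map_const', PySem.List.length_pyRange_one]
  unfold Dfun
  simp

theorem inner_inv (T : List Int) (i : Nat) (hin : i < T.length) (j : Nat) (hj : j ≤ i) :
    (PySem.List.pyRange 0 (j : Int) 1).foldl (fun dl j =>
        if te_same (PySem.List.pyGetD T (i : Int) 0) (PySem.List.pyGetD T j 0) then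
          if PySem.List.pyGetD dl j 0 + 1 > PySem.List.pyGetD dl (i : Int) 0 then
            PySem.List.pySetD dl (i : Int) (PySem.List.pyGetD dl j 0 + 1)
          else dl
        else dl) (Dfun T i)
    = PySem.List.pySetD (Dfun T i) (i : Int) (cnt (keyOf (T.getD i 0)) (T.take j) + 1) := by
  have hlen : i < (Dfun T i).length := by rw [length_Dfun T i (le_of_lt hin)]; exact hin
  induction j with
  | zero =>
    rw [Nat.cast_zero, PySem.List.pyRange_one_eq_nil le_rfl, List.foldl_nil,
      List.take_zero, cnt_nil, zero_add, PySem.List.pySetD_natCast]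
    have h0 : (Dfun T i)[i]'hlen = 1 := by
      rw [getElem_Dfun T i i (le_of_lt hin) hin, if_neg (by omega)]
    calc Dfun T i = (Dfun T i).set i ((Dfun T i)[i]'hlen) := (List.set_getElem_self hlen).symm
      _ = (Dfun T i).set i 1 := by rw [h0]
  | succ j ih =>
    have hji : j < i := by omega
    have hjT : j < T.length := by omega
    rw [show ((j + 1 : Nat) : Int) = (j : Int) + 1 by push_cast; ring,
      PySem.List.pyRange_one_succ_right (Int.natCast_nonneg j), List.foldl_append,
      ih (by omega), List.foldl_cons, List.foldl_nil]
    rw [te_same_eq, PySem.List.pyGetD_natCast T i 0, PySem.List.pyGetD_natCast T j 0]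
    have hgj : PySem.List.pyGetD (PySem.List.pySetD (Dfun T i) (i : Int)
        (cnt (keyOf (T.getD i 0)) (T.take j) + 1)) (j : Int) 0
        = cnt (keyOf (T.getD j 0)) (T.take j) + 1 := by
      rw [PySem.List.pyGetD_pySetD_natCast _ i j _ _ hlen, if_neg (by omega),
        PySem.List.pyGetD_natCast, getD_Dfun T i j (le_of_lt hin) hjT, if_pos hji]
    have hgi : PySem.List.pyGetD (PySem.List.pySetD (Dfun T i) (i : Int)
        (cnt (keyOf (T.getD i 0)) (T.take j) + 1)) (i : Int) 0
        = cnt (keyOf (T.getD i 0)) (T.take j) + 1 := by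
      rw [PySem.List.pyGetD_pySetD_natCast _ i i _ _ hlen, if_pos rfl]
    rw [hgj, hgi]
    by_cases hK : keyOf (T.getD i 0) = keyOf (T.getD j 0)
    · rw [if_pos (by rw [hK]; exact beq_self_eq_true _), if_pos (by rw [hK]; omega),
        PySem.List.pySetD_natCast, PySem.List.pySetD_natCast, List.set_set,
        cnt_take_succ T _ j hjT, if_pos hK.symm, ← PySem.List.pySetD_natCast, hK]
    · rw [if_neg (fun hc => hK (by simpa using hc)),
        cnt_take_succ T _ j hjT, if_neg (fun hh => hK hh.symm), add_zero]

theorem outer_inv (T : List Int) (m : Nat) (hm1 : 1 ≤ m) (hmn : m ≤ T.length) :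
    (PySem.List.pyRange 1 (m : Int) 1).foldl (fun dl i =>
      (PySem.List.pyRange 0 i 1).foldl (fun dl j =>
        if te_same (PySem.List.pyGetD T i 0) (PySem.List.pyGetD T j 0) then
          if PySem.List.pyGetD dl j 0 + 1 > PySem.List.pyGetD dl i 0 then
            PySem.List.pySetD dl i (PySem.List.pyGetD dl j 0 + 1)
          else dl
        else dl) dl) ((PySem.List.pyRange 0 (T.length : Int) 1).map (fun _ => (1 : Int)))
    = Dfun T m := by
  induction m with
  | zero => omega
  | succ m ih =>
    by_cases hm : m = 0
    · subst hm
      rw [Nat.cast_one, PySem.List.pyRange_one_eq_nil le_rfl, List.foldl_nil, dl0_eq,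
        Dfun_zero_one T hmn]
    · have h1m : 1 ≤ m := by omega
      rw [show ((m + 1 : Nat) : Int) = (m : Int) + 1 by push_cast; ring,
        PySem.List.pyRange_one_succ_right (by exact_mod_cast h1m), List.foldl_append,
        ih h1m (by omega), List.foldl_cons, List.foldl_nil]
      have hstep := inner_inv T m (by omega) m le_rfl
      simp only [] at hstep ⊢
      rw [hstep, Dfun_set T m (by omega)]

theorem aFold_eq (T : List Int) :
    (PySem.List.pyRange 1 (T.length : Int) 1).foldl (fun dl i =>
      (PySem.List.pyRange 0 i 1).foldl (fun dl j =>
        if te_same (PySem.List.pyGetD T i 0) (PySem.List.pyGetD T j 0) then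
          if PySem.List.pyGetD dl j 0 + 1 > PySem.List.pyGetD dl i 0 then
            PySem.List.pySetD dl i (PySem.List.pyGetD dl j 0 + 1)
          else dl
        else dl) dl) ((PySem.List.pyRange 0 (T.length : Int) 1).map (fun _ => (1 : Int)))
    = specDl [] T := by
  by_cases hT : T.length = 0
  · rw [List.length_eq_zero_iff] at hT
    subst hT
    simp [specDl, PySem.List.pyRange_one_eq_nil]
  · rw [outer_inv T T.length (by omega) le_rfl]
    unfold Dfun
    rw [Nat.sub_self, List.replicate_zero, List.append_nil,
      List.take_of_length_le (by rw [length_specDl])]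

theorem max_eq (dl : List Int) (hpos : ∀ v ∈ dl, 1 ≤ v) :
    (PySem.List.pyRange 0 (dl.length : Int) 1).foldl (fun m i =>
      if PySem.List.pyGetD dl i 0 > m then PySem.List.pyGetD dl i 0 else m) 0
    = (PySem.List.max? dl (fun v => v)).getD 0 := by
  rw [PySem.List.foldl_pyRange_zero_pyGetD' dl 0 (fun m v => if v > m then v else m) 0]
  have hstep : (fun (m v : Int) => if v > m then v else m) = (fun m v => max m v) := by
    funext m v; split <;> omega
  rw [hstep]
  cases dl with
  | nil => rfl
  | cons x t =>
    rw [PySem.List.max?_id_cons, Option.getD_some, List.foldl_cons]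
    have hx : max 0 x = x := by have := hpos x (by simp); omega
    rw [hx]

-- ===== VERDICT (by name: the statement is the Claim_ definition above) =====
theorem podciag_spec : Claim_equal_podciag := by
  intro T _
  unfold Spec_podciag
  simp only [podciag]
  rw [aFold_eq, alt_eq, max_eq _ (fun v hv => one_le_mem_specDl [] T v hv)]
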